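-- pv_equiv track=rewrite | github.com/davearussell/advent2022 | day15/solve.py | count_known_empty
-- ===== SOURCE A (Python) =====
-- def merge_ranges(ranges):
--     ranges.sort()
--     overlaps = []
--     merged = [ranges[0]]
--     for thisl, thisr in ranges[1:]:
--         prevl, prevr = merged[-1]
--         if thisr <= prevr: # this sits entirely within prev
--             pass
--         elif thisl == prevl: # prev sits entirely within this
--             merged[-1] = (thisl, thisr)
--         elif thisl <= prevr + 1: # ranges can be merged
--             overlaps.append(prevr - thisl + 1)
--             merged[-1] = (prevl, thisr)
--         else: # ranges do not overlap
--             merged.append((thisl, thisr))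
--     return merged, min(overlaps) if overlaps else None
--
-- def get_coverage(sensors, y):
--     """ """
--     ranges = []
--     for (sx, sy), (bx, by) in sensors:
--         coverage = abs(sx - bx) + abs(sy - by)
--         ydist = abs(sy - y)
--         if ydist > coverage:
--             continue
--         ranges.append((sx - (coverage - ydist),
--                        sx + (coverage - ydist)))
--
--     return merge_ranges(ranges)
--
-- def count_known_empty(sensors, y):
--     coverage = get_coverage(sensors, y)[0]
--     known_empty = 0
--     beacons = {bx for _, (bx, by) in sensors if by == y}
--     for l, r in coverage:
--         n_beacons = len([b for b in beacons if l <= b <= r])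
--         known_empty += r - l + 1 - n_beacons
--     return known_empty
-- ===== SOURCE B (Python) =====
-- def count_known_empty(sensors, y):
--     # Event-based sweep: instead of merging intervals, emit (l,+1)/(r+1,-1)
--     # boundary events, sort them, and integrate the segments where the
--     # active-overlap counter is positive; every row-y beacon is always inside
--     # its own sensor's coverage, so the distinct beacon x-values are
--     # subtracted wholesale at the end.
--     events = []
--     beacons = set()
--     for (sx, sy), (bx, by) in sensors:
--         if by == y:
--             beacons.add(bx)
--         d = abs(sx - bx) + abs(sy - by) - abs(sy - y)
--         if d >= 0:
--             events.append((sx - d, 1))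
--             events.append((sx + d + 1, -1))
--     events.sort()
--     covered = 0
--     active = 0
--     prev = 0
--     for x, delta in events:
--         if active > 0:
--             covered += x - prev
--         active += delta
--         prev = x
--     return covered - len(beacons)
-- ===== Notes on version B (the rewrite author's own statement) =====
-- stated objective: alternative
-- what changed: Replaces interval merging plus per-merged-interval beacon counting by an event-based sweep: each covering sensor emits (l,+1)/(r+1,-1) boundary events, the sorted event stream is integrated with an active-overlap counter, and the distinct row-y beacon x-values are subtracted wholesale at the end (every row-y beacon provably lies inside coverage).
import Mathlib
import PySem

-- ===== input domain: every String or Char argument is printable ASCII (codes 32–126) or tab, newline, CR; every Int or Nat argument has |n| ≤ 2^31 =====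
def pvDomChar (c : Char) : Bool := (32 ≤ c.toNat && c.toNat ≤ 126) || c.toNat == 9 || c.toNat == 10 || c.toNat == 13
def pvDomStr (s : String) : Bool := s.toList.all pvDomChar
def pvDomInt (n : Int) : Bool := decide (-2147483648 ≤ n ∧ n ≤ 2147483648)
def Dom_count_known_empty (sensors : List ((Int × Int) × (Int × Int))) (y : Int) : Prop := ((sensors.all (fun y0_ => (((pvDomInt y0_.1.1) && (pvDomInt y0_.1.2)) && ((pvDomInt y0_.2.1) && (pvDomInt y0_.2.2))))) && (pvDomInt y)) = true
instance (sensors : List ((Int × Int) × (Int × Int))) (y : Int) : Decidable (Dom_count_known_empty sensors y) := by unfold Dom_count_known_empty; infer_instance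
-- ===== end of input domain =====

-- B replaces A's merge_ranges + per-merged-interval beacon counting by an event-based
-- sweep (boundary events (l,+1)/(r+1,-1), sorted, integrated with an active counter),
-- subtracting the distinct row-y beacon x-values wholesale at the end.

-- ===== PORT A =====
-- merged list kept head-first (head = Python's merged[-1]); state = (merged, overlaps)
def pvMergeStep (st : List (Int × Int) × List Int) (t : Int × Int) : List (Int × Int) × List Int :=
  match st.1 with
  | [] => st   -- unreachable: merged starts nonempty
  | (prevl, prevr) :: rest =>
    if t.2 ≤ prevr then st
    else if t.1 = prevl then ((t.1, t.2) :: rest, st.2)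
    else if t.1 ≤ prevr + 1 then ((prevl, t.2) :: rest, st.2 ++ [prevr - t.1 + 1])
    else ((t.1, t.2) :: st.1, st.2)

-- get_coverage's ranges list
def pvRangesA (sensors : List ((Int × Int) × (Int × Int))) (y : Int) : List (Int × Int) :=
  sensors.foldl (fun acc s =>
    let cov := |s.1.1 - s.2.1| + |s.1.2 - s.2.2|
    let ydist := |s.1.2 - y|
    if ydist > cov then acc
    else acc ++ [(s.1.1 - (cov - ydist), s.1.1 + (cov - ydist))]) []

-- {bx for _, (bx, by) in sensors if by == y}
def pvBeacons (sensors : List ((Int × Int) × (Int × Int))) (y : Int) : PySem.Set Int :=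
  PySem.Set.ofList ((sensors.filter (fun s => s.2.2 == y)).map (fun s => s.2.1))

def count_known_empty (sensors : List ((Int × Int) × (Int × Int))) (y : Int) : Int :=
  match PySem.List.sorted2 (pvRangesA sensors y) (fun p => p.1) (fun p => p.2) with
  | [] => 0   -- Python raises IndexError here (ranges[0] on an empty list); excluded by Pre_
  | r0 :: rest =>
    let st := rest.foldl pvMergeStep ([r0], [])
    let coverage := st.1.reverse
    let beacons := pvBeacons sensors y
    coverage.foldl (fun acc p =>
      acc + (p.2 - p.1 + 1 -
        ((beacons.filter (fun b => decide (p.1 ≤ b) && decide (b ≤ p.2))).length : Int))) 0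

-- ===== PORT B =====
-- one loop building the event list and the beacon set together
def pvBuildStep (y : Int) (st : List (Int × Int) × PySem.Set Int)
    (s : (Int × Int) × (Int × Int)) : List (Int × Int) × PySem.Set Int :=
  let bset := if s.2.2 == y then PySem.Set.add st.2 s.2.1 else st.2
  let d := |s.1.1 - s.2.1| + |s.1.2 - s.2.2| - |s.1.2 - y|
  let ev := if d ≥ 0 then st.1 ++ [(s.1.1 - d, 1), (s.1.1 + d + 1, -1)] else st.1
  (ev, bset)

-- sweep state = (covered, active, prev)
def pvSweepEvStep (acc : Int × Int × Int) (e : Int × Int) : Int × Int × Int :=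
  ((if acc.2.1 > 0 then acc.1 + (e.1 - acc.2.2) else acc.1), acc.2.1 + e.2, e.1)

def count_known_empty_alt (sensors : List ((Int × Int) × (Int × Int))) (y : Int) : Int :=
  let st := sensors.foldl (pvBuildStep y) ([], PySem.Set.empty)
  let events := PySem.List.sorted2 st.1 (fun e => e.1) (fun e => e.2)
  (events.foldl pvSweepEvStep (0, 0, 0)).1 - (st.2.length : Int)

-- ===== PRECONDITION & SPEC =====
-- Pre_ excludes exactly the inputs where no sensor's coverage reaches row y: there A
-- raises IndexError (ranges[0] on an empty list).
def Pre_count_known_empty (sensors : List ((Int × Int) × (Int × Int))) (y : Int) : Prop :=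
  sensors.any (fun s => |s.1.2 - y| ≤ |s.1.1 - s.2.1| + |s.1.2 - s.2.2|) = true
instance (sensors : List ((Int × Int) × (Int × Int))) (y : Int) : Decidable (Pre_count_known_empty sensors y) := by unfold Pre_count_known_empty; infer_instance

def pvWitness_count_known_empty : (List ((Int × Int) × (Int × Int))) × Int := ([((0, 0), (2, 0)), ((10, 3), (10, 5))], 0)

def Spec_count_known_empty (sensors : List ((Int × Int) × (Int × Int))) (y : Int) (out : Int) : Prop := out = count_known_empty_alt sensors y
instance (sensors : List ((Int × Int) × (Int × Int))) (y : Int) (out : Int) : Decidable (Spec_count_known_empty sensors y out) := by unfold Spec_count_known_empty; infer_instance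

-- ===== CLAIM (what is proved, stated in full; the proofs are below) =====
def Claim_equal_count_known_empty : Prop := ∀ (sensors : List ((Int × Int) × (Int × Int))) (y : Int), Dom_count_known_empty sensors y → Pre_count_known_empty sensors y → Spec_count_known_empty sensors y (count_known_empty sensors y)

-- ===== LEMMAS AND PROOFS =====

-- the set of cells covered by a list of closed intervals, as a Finset of integers
noncomputable def pvIccU (L : List (Int × Int)) : Finset Int :=
  L.foldr (fun p acc => Finset.Icc p.1 p.2 ∪ acc) ∅

lemma mem_pvIccU (L : List (Int × Int)) (z : Int) :
    z ∈ pvIccU L ↔ ∃ p ∈ L, p.1 ≤ z ∧ z ≤ p.2 := by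
  induction L with
  | nil => simp [pvIccU]
  | cons p t ih =>
    simp only [pvIccU, List.foldr_cons, Finset.mem_union, Finset.mem_Icc] at ih ⊢
    rw [ih]
    simp only [List.mem_cons]
    constructor
    · rintro (h | ⟨q, hq, h1, h2⟩)
      · exact ⟨p, Or.inl rfl, h⟩
      · exact ⟨q, Or.inr hq, h1, h2⟩
    · rintro ⟨q, (rfl | hq), h1, h2⟩
      · exact Or.inl ⟨h1, h2⟩
      · exact Or.inr ⟨q, hq, h1, h2⟩

lemma pvIccU_nil : pvIccU [] = ∅ := rfl

lemma pvIccU_cons (p : Int × Int) (L : List (Int × Int)) :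
    pvIccU (p :: L) = Finset.Icc p.1 p.2 ∪ pvIccU L := rfl

lemma pvIccU_perm {L L' : List (Int × Int)} (h : L.Perm L') : pvIccU L = pvIccU L' := by
  ext z
  simp only [mem_pvIccU]
  constructor <;> rintro ⟨p, hp, h1, h2⟩
  · exact ⟨p, h.mem_iff.mp hp, h1, h2⟩
  · exact ⟨p, h.mem_iff.mpr hp, h1, h2⟩

lemma pvCountP_union (bs : List Int) (A B : Finset Int) (h : Disjoint A B) :
    bs.countP (fun b => decide (b ∈ A ∪ B))
      = bs.countP (fun b => decide (b ∈ A)) + bs.countP (fun b => decide (b ∈ B)) := by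
  induction bs with
  | nil => simp
  | cons b t ih =>
    have hnot : ¬(b ∈ A ∧ b ∈ B) := by
      rintro ⟨h1, h2⟩; exact (Finset.disjoint_left.mp h h1) h2
    have e1 : (if decide (b ∈ A ∪ B) = true then 1 else 0)
        = ((if decide (b ∈ A) = true then 1 else 0) + (if decide (b ∈ B) = true then 1 else 0) : Nat) := by
      by_cases hA : b ∈ A <;> by_cases hB : b ∈ B <;>
        simp only [hA, hB, Finset.mem_union, decide_true, decide_false] <;>
        first
        | rfl
        | exact absurd ⟨hA, hB⟩ hnot
    rw [List.countP_cons, List.countP_cons, List.countP_cons, ih, e1]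
    omega

-- the ranges list of get_coverage, as filter+map
def pvCond (y : Int) (s : (Int × Int) × (Int × Int)) : Bool :=
  !decide (|s.1.2 - y| > |s.1.1 - s.2.1| + |s.1.2 - s.2.2|)
def pvRangeOf (y : Int) (s : (Int × Int) × (Int × Int)) : Int × Int :=
  (s.1.1 - (|s.1.1 - s.2.1| + |s.1.2 - s.2.2| - |s.1.2 - y|),
   s.1.1 + (|s.1.1 - s.2.1| + |s.1.2 - s.2.2| - |s.1.2 - y|))

lemma pvRangesA_eq (sensors : List ((Int × Int) × (Int × Int))) (y : Int) :
    pvRangesA sensors y = (sensors.filter (pvCond y)).map (pvRangeOf y) := by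
  unfold pvRangesA
  suffices h : ∀ (l : List ((Int × Int) × (Int × Int))) (acc : List (Int × Int)),
      l.foldl (fun acc s =>
        let cov := |s.1.1 - s.2.1| + |s.1.2 - s.2.2|
        let ydist := |s.1.2 - y|
        if ydist > cov then acc
        else acc ++ [(s.1.1 - (cov - ydist), s.1.1 + (cov - ydist))]) acc
        = acc ++ (l.filter (pvCond y)).map (pvRangeOf y) by
    simpa using h sensors []
  intro l
  induction l with
  | nil => simp
  | cons s t ih =>
    intro acc
    simp only [List.foldl_cons]
    by_cases hc : |s.1.2 - y| > |s.1.1 - s.2.1| + |s.1.2 - s.2.2|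
    · rw [if_pos hc, ih]
      have : pvCond y s = false := by simp [pvCond]; omega
      simp [this]
    · rw [if_neg hc, ih]
      have : pvCond y s = true := by simp [pvCond]; omega
      simp [this, pvRangeOf, List.append_assoc]

lemma pvRangesA_valid (sensors : List ((Int × Int) × (Int × Int))) (y : Int) :
    ∀ p ∈ pvRangesA sensors y, p.1 ≤ p.2 := by
  rw [pvRangesA_eq]
  intro p hp
  simp only [List.mem_map, List.mem_filter] at hp
  obtain ⟨s, ⟨_, hc⟩, rfl⟩ := hp
  simp only [pvCond, Bool.not_eq_true', decide_eq_false_iff_not, not_lt] at hc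
  simp only [pvRangeOf]
  omega

lemma pvRangesA_ne_nil (sensors : List ((Int × Int) × (Int × Int))) (y : Int)
    (hpre : Pre_count_known_empty sensors y) : pvRangesA sensors y ≠ [] := by
  rw [pvRangesA_eq]
  unfold Pre_count_known_empty at hpre
  simp only [List.any_eq_true, decide_eq_true_eq] at hpre
  obtain ⟨s, hs, hc⟩ := hpre
  intro hnil
  rw [List.map_eq_nil_iff, List.filter_eq_nil_iff] at hnil
  exact hnil s hs (by simp [pvCond]; omega)

-- every row-y beacon lies inside some range
lemma pvBeacons_covered (sensors : List ((Int × Int) × (Int × Int))) (y : Int) :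
    ∀ b ∈ pvBeacons sensors y, b ∈ pvIccU (pvRangesA sensors y) := by
  intro b hb
  unfold pvBeacons at hb
  rw [PySem.Set.mem_ofList] at hb
  simp only [List.mem_map, List.mem_filter, beq_iff_eq] at hb
  obtain ⟨s, ⟨hs, hy⟩, rfl⟩ := hb
  rw [mem_pvIccU, pvRangesA_eq]
  refine ⟨pvRangeOf y s, List.mem_map_of_mem ?_, ?_⟩
  · rw [List.mem_filter]
    refine ⟨hs, ?_⟩
    simp only [pvCond, hy, Bool.not_eq_true', decide_eq_false_iff_not, not_lt]
    have := abs_nonneg (s.1.1 - s.2.1)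
    omega
  · simp only [pvRangeOf, hy]
    rcases abs_cases (s.1.1 - s.2.1) with ⟨h1, h2⟩ | ⟨h1, h2⟩ <;> constructor <;> omega

-- sorted2 by (fst, snd) is Pairwise nondecreasing in fst
lemma pvInsertBy_pairwise (x : Int × Int) (ys : List (Int × Int))
    (h : ys.Pairwise (fun a b => a.1 ≤ b.1)) :
    (PySem.List.insertBy
      (fun a b => decide (a.1 < b.1) || (!decide (b.1 < a.1) && decide (a.2 < b.2))) x ys).Pairwise
      (fun a b => a.1 ≤ b.1) := by
  induction ys with
  | nil => simp [PySem.List.insertBy]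
  | cons v t ih =>
    rw [PySem.List.insertBy.eq_2]
    rcases List.pairwise_cons.mp h with ⟨hv, ht⟩
    by_cases hb : (decide (x.1 < v.1) || (!decide (v.1 < x.1) && decide (x.2 < v.2))) = true
    · rw [if_pos hb]
      have hxv : x.1 ≤ v.1 := by
        simp only [Bool.or_eq_true, Bool.and_eq_true, Bool.not_eq_true', decide_eq_true_eq,
          decide_eq_false_iff_not] at hb
        omega
      refine List.pairwise_cons.mpr ⟨?_, h⟩
      intro q hq
      rcases List.mem_cons.mp hq with rfl | hq
      · exact hxv
      · exact le_trans hxv (hv q hq)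
    · rw [if_neg hb]
      have hvx : v.1 ≤ x.1 := by
        simp only [Bool.or_eq_true, Bool.and_eq_true, Bool.not_eq_true', decide_eq_true_eq,
          decide_eq_false_iff_not, not_or, not_and] at hb
        omega
      refine List.pairwise_cons.mpr ⟨?_, ih ht⟩
      intro q hq
      rcases (PySem.List.insertBy_mem_iff _ _ _ _).mp hq with rfl | hq
      · exact hvx
      · exact hv q hq

lemma pvSorted2_pairwise (xs : List (Int × Int)) :
    (PySem.List.sorted2 xs (fun p => p.1) (fun p => p.2)).Pairwise (fun a b => a.1 ≤ b.1) := by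
  unfold PySem.List.sorted2
  simp only [if_neg (by decide : ¬(false = true))]
  suffices h : ∀ (l acc : List (Int × Int)), acc.Pairwise (fun a b => a.1 ≤ b.1) →
      (l.foldl (fun acc x => PySem.List.insertBy
        (fun a b => decide (a.1 < b.1) || (!decide (b.1 < a.1) && decide (a.2 < b.2))) x acc) acc).Pairwise
        (fun a b => a.1 ≤ b.1) by
    exact h xs [] (by simp)
  intro l
  induction l with
  | nil => intro acc h; simpa using h
  | cons x t ih =>
    intro acc h
    exact ih _ (pvInsertBy_pairwise x acc h)

-- ---- A side: the merge loop computes a gap-separated decomposition of the union ----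

lemma pvMerge_inv (rest : List (Int × Int)) :
    ∀ (cl cr : Int) (done : List (Int × Int)) (ov : List Int),
    (((cl, cr) :: done).Pairwise (fun p q => q.2 + 1 < p.1)) →
    (∀ p ∈ (cl, cr) :: done, p.1 ≤ p.2) →
    (∀ p ∈ rest, cl ≤ p.1) →
    rest.Pairwise (fun p q => p.1 ≤ q.1) →
    (∀ p ∈ rest, p.1 ≤ p.2) →
    ∃ cl' cr' done', (rest.foldl pvMergeStep ((cl, cr) :: done, ov)).1 = (cl', cr') :: done' ∧
      (((cl', cr') :: done').Pairwise (fun p q => q.2 + 1 < p.1)) ∧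
      (∀ p ∈ (cl', cr') :: done', p.1 ≤ p.2) ∧
      pvIccU ((cl', cr') :: done') = pvIccU ((cl, cr) :: done) ∪ pvIccU rest := by
  induction rest with
  | nil =>
    intro cl cr done ov hpw hval _ _ _
    exact ⟨cl, cr, done, rfl, hpw, hval, by simp [pvIccU_nil]⟩
  | cons t tl ih =>
    intro cl cr done ov hpw hval hmin hpwR hvR
    rcases List.pairwise_cons.mp hpw with ⟨hgap, hpwd⟩
    rcases List.pairwise_cons.mp hpwR with ⟨hminR, hpwR'⟩
    have ht1 : cl ≤ t.1 := hmin t (by simp)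
    have htv : t.1 ≤ t.2 := hvR t (by simp)
    have hclcr : cl ≤ cr := hval (cl, cr) (by simp)
    have hmin' : ∀ p ∈ tl, cl ≤ p.1 := fun p hp => hmin p (by simp [hp])
    have hvR' : ∀ p ∈ tl, p.1 ≤ p.2 := fun p hp => hvR p (by simp [hp])
    simp only [List.foldl_cons]
    by_cases h1 : t.2 ≤ cr
    · -- t sits entirely within the current head
      have hstep : pvMergeStep ((cl, cr) :: done, ov) t = ((cl, cr) :: done, ov) := by
        simp [pvMergeStep, h1]
      rw [hstep]
      obtain ⟨cl', cr', done', heq, hpw', hval', hU⟩ :=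
        ih cl cr done ov hpw hval hmin' hpwR' hvR'
      refine ⟨cl', cr', done', heq, hpw', hval', ?_⟩
      rw [hU, pvIccU_cons (L := done), pvIccU_cons (L := tl)]
      ext z
      simp only [Finset.mem_union, Finset.mem_Icc]
      by_cases hD : z ∈ pvIccU done <;> by_cases hT : z ∈ pvIccU tl <;>
        (first | (simp [hD, hT]; omega) | simp [hD, hT])
    · by_cases h2 : t.1 = cl
      · -- the current head sits entirely within t
        have hstep : pvMergeStep ((cl, cr) :: done, ov) t = ((t.1, t.2) :: done, ov) := by
          simp [pvMergeStep, h1, h2]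
        rw [hstep]
        obtain ⟨cl', cr', done', heq, hpw', hval', hU⟩ :=
          ih t.1 t.2 done ov
            (List.pairwise_cons.mpr ⟨fun q hq => by have := hgap q hq; omega, hpwd⟩)
            (fun p hp => by
              rcases List.mem_cons.mp hp with rfl | hp
              · exact htv
              · exact hval p (by simp [hp]))
            (fun p hp => by have := hmin' p hp; omega)
            hpwR' hvR'
        refine ⟨cl', cr', done', heq, hpw', hval', ?_⟩
        rw [hU, pvIccU_cons (L := done), pvIccU_cons (L := done), pvIccU_cons (L := tl)]
        ext z
        simp only [Finset.mem_union, Finset.mem_Icc]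
        by_cases hD : z ∈ pvIccU done <;> by_cases hT : z ∈ pvIccU tl <;>
          (first | (simp [hD, hT]; omega) | simp [hD, hT])
      · by_cases h3 : t.1 ≤ cr + 1
        · -- overlapping: merge into (cl, t.2)
          have hstep : pvMergeStep ((cl, cr) :: done, ov) t
              = ((cl, t.2) :: done, ov ++ [cr - t.1 + 1]) := by
            simp [pvMergeStep, h1, h2, h3]
          rw [hstep]
          obtain ⟨cl', cr', done', heq, hpw', hval', hU⟩ :=
            ih cl t.2 done (ov ++ [cr - t.1 + 1])
              (List.pairwise_cons.mpr ⟨fun q hq => hgap q hq, hpwd⟩)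
              (fun p hp => by
                rcases List.mem_cons.mp hp with rfl | hp
                · simp; omega
                · exact hval p (by simp [hp]))
              hmin' hpwR' hvR'
          refine ⟨cl', cr', done', heq, hpw', hval', ?_⟩
          rw [hU, pvIccU_cons (L := done), pvIccU_cons (L := done), pvIccU_cons (L := tl)]
          ext z
          simp only [Finset.mem_union, Finset.mem_Icc]
          by_cases hD : z ∈ pvIccU done <;> by_cases hT : z ∈ pvIccU tl <;>
            (first | (simp [hD, hT]; omega) | simp [hD, hT])
        · -- disjoint: push a new head
          have hstep : pvMergeStep ((cl, cr) :: done, ov)  t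
              = ((t.1, t.2) :: (cl, cr) :: done, ov) := by
            simp [pvMergeStep, h1, h2, h3]
          rw [hstep]
          obtain ⟨cl', cr', done', heq, hpw', hval', hU⟩ :=
            ih t.1 t.2 ((cl, cr) :: done) ov
              (List.pairwise_cons.mpr ⟨fun q hq => by
                rcases List.mem_cons.mp hq with rfl | hq
                · simp; omega
                · have := hgap q hq; simp; omega, hpw⟩)
              (fun p hp => by
                rcases List.mem_cons.mp hp with rfl | hp
                · exact htv
                · exact hval p hp)
              (fun p hp => hminR p hp)
              hpwR' hvR'
          refine ⟨cl', cr', done', heq, hpw', hval', ?_⟩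
          rw [hU, pvIccU_cons (L := (cl, cr) :: done), pvIccU_cons (L := done),
            pvIccU_cons (L := tl)]
          ext z
          simp only [Finset.mem_union, Finset.mem_Icc]
          by_cases hD : z ∈ pvIccU done <;> by_cases hT : z ∈ pvIccU tl <;>
            (first | (simp [hD, hT]; omega) | simp [hD, hT])

-- sum over a gap-separated list of (length − beacons inside)
def pvSumF (beacons : List Int) (m : List (Int × Int)) : Int :=
  (m.map (fun p => p.2 - p.1 + 1 -
    ((beacons.filter (fun b => decide (p.1 ≤ b) && decide (b ≤ p.2))).length : Int))).sum

lemma pvSumF_of_gap (beacons : List Int) :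
    ∀ (L : List (Int × Int)), L.Pairwise (fun p q => q.2 + 1 < p.1) → (∀ p ∈ L, p.1 ≤ p.2) →
    pvSumF beacons L = ((pvIccU L).card : Int) - (beacons.countP (fun b => decide (b ∈ pvIccU L)) : Int) := by
  intro L
  induction L with
  | nil =>
    intro _ _
    simp [pvSumF, pvIccU_nil]
  | cons p t ih =>
    intro hpw hval
    rcases List.pairwise_cons.mp hpw with ⟨hgap, hpw'⟩
    have hp : p.1 ≤ p.2 := hval p (by simp)
    have hdisj : Disjoint (Finset.Icc p.1 p.2) (pvIccU t) := by
      rw [Finset.disjoint_left]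
      intro z hz hz'
      rw [Finset.mem_Icc] at hz
      rw [mem_pvIccU] at hz'
      obtain ⟨q, hq, hq1, hq2⟩ := hz'
      have := hgap q hq
      omega
    have hcard : ((pvIccU (p :: t)).card : Int)
        = (p.2 - p.1 + 1) + ((pvIccU t).card : Int) := by
      rw [pvIccU_cons, Finset.card_union_of_disjoint hdisj, Int.card_Icc]
      push_cast
      omega
    have hcnt : beacons.countP (fun b => decide (b ∈ pvIccU (p :: t)))
        = beacons.countP (fun b => decide (p.1 ≤ b) && decide (b ≤ p.2))
          + beacons.countP (fun b => decide (b ∈ pvIccU t)) := by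
      rw [pvIccU_cons, pvCountP_union beacons _ _ hdisj]
      congr 1
      apply List.countP_congr
      intro b _
      simp [Finset.mem_Icc]
    have hflen : ((beacons.filter (fun b => decide (p.1 ≤ b) && decide (b ≤ p.2))).length : Int)
        = (beacons.countP (fun b => decide (p.1 ≤ b) && decide (b ≤ p.2)) : Int) := by
      rw [List.countP_eq_length_filter]
    simp only [pvSumF, List.map_cons, List.sum_cons] at ih ⊢
    rw [hflen, ih hpw' (fun q hq => hval q (by simp [hq])), hcard, hcnt]
    push_cast
    ring

lemma pvFoldA_eq_sumF (beacons : List Int) (m : List (Int × Int)) :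
    m.foldl (fun acc p =>
      acc + (p.2 - p.1 + 1 -
        ((beacons.filter (fun b => decide (p.1 ≤ b) && decide (b ≤ p.2))).length : Int))) 0
      = pvSumF beacons m := by
  rw [PySem.List.foldl_add m (fun p : Int × Int => p.2 - p.1 + 1 -
        ((beacons.filter (fun b => decide (p.1 ≤ b) && decide (b ≤ p.2))).length : Int)) 0]
  simp [pvSumF]

lemma pvSumF_reverse (beacons : List Int) (m : List (Int × Int)) :
    pvSumF beacons m.reverse = pvSumF beacons m := by
  simp [pvSumF, List.map_reverse]

-- ---- B side: the event sweep integrates the same union ----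

-- the region the sweep still adds, given active count a and position prev
noncomputable def pvG : Int → Int → List (Int × Int) → Finset Int
  | _, _, [] => ∅
  | a, prev, e :: rest => (if 0 < a then Finset.Icc prev (e.1 - 1) else ∅) ∪ pvG (a + e.2) e.1 rest

lemma pvG_subset : ∀ (E : List (Int × Int)) (a prev : Int), (∀ q ∈ E, prev ≤ q.1) →
    E.Pairwise (fun p q => p.1 ≤ q.1) → ∀ z ∈ pvG a prev E, prev ≤ z := by
  intro E
  induction E with
  | nil => intro a prev _ _ z hz; simp [pvG] at hz
  | cons e t ih =>
    intro a prev h1 h2 z hz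
    rcases List.pairwise_cons.mp h2 with ⟨he, ht⟩
    simp only [pvG, Finset.mem_union] at hz
    have hprev : prev ≤ e.1 := h1 e (by simp)
    rcases hz with hz | hz
    · split_ifs at hz with hpos
      · rw [Finset.mem_Icc] at hz; omega
      · simp at hz
    · have := ih (a + e.2) e.1 he ht z hz
      omega

lemma pvSweep_covered : ∀ (E : List (Int × Int)) (c a prev : Int),
    E.Pairwise (fun p q => p.1 ≤ q.1) → (0 < a → ∀ q ∈ E, prev ≤ q.1) →
    (E.foldl pvSweepEvStep (c, a, prev)).1 = c + ((pvG a prev E).card : Int) := by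
  intro E
  induction E with
  | nil => intro c a prev _ _; simp [pvG]
  | cons e t ih =>
    intro c a prev hpw hmin
    rcases List.pairwise_cons.mp hpw with ⟨he, ht⟩
    have hdisj : ∀ (b : Int), Disjoint (Finset.Icc prev (e.1 - 1)) (pvG b e.1 t) := by
      intro b
      rw [Finset.disjoint_left]
      intro z hz hz'
      rw [Finset.mem_Icc] at hz
      have := pvG_subset t b e.1 he ht z hz'
      omega
    simp only [List.foldl_cons, pvSweepEvStep, pvG]
    by_cases hpos : a > 0
    · have hprev : prev ≤ e.1 := hmin hpos e (by simp)
      rw [if_pos hpos, if_pos hpos]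
      rw [ih (c + (e.1 - prev)) (a + e.2) e.1 ht (fun _ q hq => he q hq)]
      rw [Finset.card_union_of_disjoint (hdisj _), Int.card_Icc]
      have : ((e.1 - 1 + 1 - prev).toNat : Int) = e.1 - prev := by omega
      push_cast
      omega
    · rw [if_neg hpos, if_neg (by omega)]
      rw [ih c (a + e.2) e.1 ht (fun _ q hq => he q hq)]
      simp

-- net number of interval-openings at or left of z
def pvCntE (E : List (Int × Int)) (z : Int) : Int :=
  (E.map (fun q => if q.1 ≤ z then q.2 else 0)).sum

lemma pvCntE_perm {E E' : List (Int × Int)} (z : Int) (h : E.Perm E') :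
    pvCntE E z = pvCntE E' z := (h.map _).sum_eq

lemma pvCntE_zero (E : List (Int × Int)) (z : Int) (h : ∀ q ∈ E, z < q.1) :
    pvCntE E z = 0 := by
  unfold pvCntE
  induction E with
  | nil => simp
  | cons q t ih =>
    simp only [List.map_cons, List.sum_cons]
    rw [if_neg (by have := h q (by simp); omega), ih (fun q hq => h q (by simp [hq]))]
    simp

lemma mem_pvG : ∀ (E : List (Int × Int)) (a prev z : Int), (∀ q ∈ E, prev ≤ q.1) →
    E.Pairwise (fun p q => p.1 ≤ q.1) →
    (z ∈ pvG a prev E ↔ prev ≤ z ∧ (∃ q ∈ E, z < q.1) ∧ 0 < a + pvCntE E z) := by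
  intro E
  induction E with
  | nil => intro a prev z _ _; simp [pvG]
  | cons e t ih =>
    intro a prev z h1 h2
    rcases List.pairwise_cons.mp h2 with ⟨he, ht⟩
    have hprev : prev ≤ e.1 := h1 e (by simp)
    simp only [pvG, Finset.mem_union]
    by_cases hez : e.1 ≤ z
    · -- z to the right of the first event: the head Icc cannot contain it
      have hnicc : z ∉ (if 0 < a then Finset.Icc prev (e.1 - 1) else ∅) := by
        split_ifs <;> simp [Finset.mem_Icc]
        omega
      have hcnt : pvCntE (e :: t) z = e.2 + pvCntE t z := by
        simp [pvCntE, if_pos hez]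
      constructor
      · rintro (hz | hz)
        · exact absurd hz hnicc
        · rcases (ih (a + e.2) e.1 z he ht).mp hz with ⟨_, ⟨q, hq, hzq⟩, hc⟩
          exact ⟨by omega, ⟨q, by simp [hq], hzq⟩, by rw [hcnt]; omega⟩
      · rintro ⟨_, ⟨q, hq, hzq⟩, hc⟩
        refine Or.inr ((ih (a + e.2) e.1 z he ht).mpr ⟨hez, ⟨q, ?_, hzq⟩, by rw [hcnt] at hc; omega⟩)
        rcases List.mem_cons.mp hq with rfl | hq
        · omega
        · exact hq
    · -- z strictly left of every event
      have hallgt : ∀ q ∈ e :: t, z < q.1 := by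
        intro q hq
        rcases List.mem_cons.mp hq with rfl | hq
        · omega
        · have := he q hq; omega
      have hcnt : pvCntE (e :: t) z = 0 := pvCntE_zero _ _ hallgt
      have hnt : z ∉ pvG (a + e.2) e.1 t := by
        intro hz
        have := pvG_subset t (a + e.2) e.1 he ht z hz
        omega
      constructor
      · rintro (hz | hz)
        · split_ifs at hz with hpos
          · rw [Finset.mem_Icc] at hz
            exact ⟨hz.1, ⟨e, by simp, by omega⟩, by rw [hcnt]; omega⟩
          · simp at hz
        · exact absurd hz hnt
      · rintro ⟨hpz, _, hc⟩
        rw [hcnt] at hc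
        left
        rw [if_pos (by omega), Finset.mem_Icc]
        omega

-- the event list of a range list
def pvEv (R : List (Int × Int)) : List (Int × Int) :=
  R.flatMap (fun p => [(p.1, 1), (p.2 + 1, -1)])

lemma pvCntE_pvEv (R : List (Int × Int)) (z : Int) (hv : ∀ p ∈ R, p.1 ≤ p.2) :
    pvCntE (pvEv R) z = (R.countP (fun p => decide (p.1 ≤ z) && decide (z ≤ p.2)) : Int) := by
  induction R with
  | nil => simp [pvCntE, pvEv]
  | cons p t ih =>
    have hp : p.1 ≤ p.2 := hv p (by simp)
    have ih' := ih (fun q hq => hv q (by simp [hq]))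
    simp only [pvEv, List.flatMap_cons, pvCntE, List.map_append, List.sum_append,
      List.map_cons, List.sum_cons, List.map_nil, List.sum_nil, List.countP_cons] at ih' ⊢
    rw [ih']
    by_cases h1 : p.1 ≤ z <;> by_cases h2 : p.2 + 1 ≤ z <;>
      [ (rw [if_pos h1, if_pos h2]); (rw [if_pos h1, if_neg h2]);
        (rw [if_neg h1, if_pos h2]); (rw [if_neg h1, if_neg h2]) ] <;>
      [ (rw [if_neg (by simp; omega)]); (rw [if_pos (by simp; omega)]);
        (rw [if_neg (by simp; omega)]); (rw [if_neg (by simp; omega)]) ] <;>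
      push_cast <;> omega

-- B's building loop: events component
lemma pvBuild_fst (sensors : List ((Int × Int) × (Int × Int))) (y : Int) :
    (sensors.foldl (pvBuildStep y) ([], PySem.Set.empty)).1 = pvEv (pvRangesA sensors y) := by
  have hstep : pvBuildStep y = fun st s =>
      ((fun acc (s : (Int × Int) × (Int × Int)) =>
          if |s.1.1 - s.2.1| + |s.1.2 - s.2.2| - |s.1.2 - y| ≥ 0 then
            acc ++ [(s.1.1 - (|s.1.1 - s.2.1| + |s.1.2 - s.2.2| - |s.1.2 - y|), 1),
                    (s.1.1 + (|s.1.1 - s.2.1| + |s.1.2 - s.2.2| - |s.1.2 - y|) + 1, -1)]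
          else acc) st.1 s,
       (fun acc (s : (Int × Int) × (Int × Int)) =>
          if s.2.2 == y then PySem.Set.add acc s.2.1 else acc) st.2 s) := rfl
  rw [hstep, PySem.List.foldl_prod_mk
    (f := fun acc (s : (Int × Int) × (Int × Int)) =>
      if |s.1.1 - s.2.1| + |s.1.2 - s.2.2| - |s.1.2 - y| ≥ 0 then
        acc ++ [(s.1.1 - (|s.1.1 - s.2.1| + |s.1.2 - s.2.2| - |s.1.2 - y|), 1),
                (s.1.1 + (|s.1.1 - s.2.1| + |s.1.2 - s.2.2| - |s.1.2 - y|) + 1, -1)]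
      else acc)
    (g := fun acc (s : (Int × Int) × (Int × Int)) =>
      if s.2.2 == y then PySem.Set.add acc s.2.1 else acc)]
  rw [pvRangesA_eq]
  unfold pvEv
  rw [List.flatMap_map]
  suffices h : ∀ (l : List ((Int × Int) × (Int × Int))) (acc : List (Int × Int)),
      l.foldl (fun acc s =>
          if |s.1.1 - s.2.1| + |s.1.2 - s.2.2| - |s.1.2 - y| ≥ 0 then
            acc ++ [(s.1.1 - (|s.1.1 - s.2.1| + |s.1.2 - s.2.2| - |s.1.2 - y|), 1),
                    (s.1.1 + (|s.1.1 - s.2.1| + |s.1.2 - s.2.2| - |s.1.2 - y|) + 1, -1)]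
          else acc) acc
        = acc ++ (l.filter (pvCond y)).flatMap
            (fun s => [((pvRangeOf y s).1, 1), ((pvRangeOf y s).2 + 1, -1)]) by
    simpa using h sensors []
  intro l
  induction l with
  | nil => simp
  | cons s t ih =>
    intro acc
    simp only [List.foldl_cons]
    by_cases hc : |s.1.1 - s.2.1| + |s.1.2 - s.2.2| - |s.1.2 - y| ≥ 0
    · rw [if_pos hc, ih]
      have : pvCond y s = true := by simp [pvCond]; omega
      simp [this, pvRangeOf, List.append_assoc]
    · rw [if_neg hc, ih]
      have : pvCond y s = false := by simp [pvCond]; omega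
      simp [this]

-- B's building loop: beacon-set component
lemma pvBuild_snd (sensors : List ((Int × Int) × (Int × Int))) (y : Int) :
    (sensors.foldl (pvBuildStep y) ([], PySem.Set.empty)).2 = pvBeacons sensors y := by
  have hstep : pvBuildStep y = fun st s =>
      ((fun acc (s : (Int × Int) × (Int × Int)) =>
          if |s.1.1 - s.2.1| + |s.1.2 - s.2.2| - |s.1.2 - y| ≥ 0 then
            acc ++ [(s.1.1 - (|s.1.1 - s.2.1| + |s.1.2 - s.2.2| - |s.1.2 - y|), 1),
                    (s.1.1 + (|s.1.1 - s.2.1| + |s.1.2 - s.2.2| - |s.1.2 - y|) + 1, -1)]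
          else acc) st.1 s,
       (fun acc (s : (Int × Int) × (Int × Int)) =>
          if s.2.2 == y then PySem.Set.add acc s.2.1 else acc) st.2 s) := rfl
  rw [hstep, PySem.List.foldl_prod_mk
    (f := fun acc (s : (Int × Int) × (Int × Int)) =>
      if |s.1.1 - s.2.1| + |s.1.2 - s.2.2| - |s.1.2 - y| ≥ 0 then
        acc ++ [(s.1.1 - (|s.1.1 - s.2.1| + |s.1.2 - s.2.2| - |s.1.2 - y|), 1),
                (s.1.1 + (|s.1.1 - s.2.1| + |s.1.2 - s.2.2| - |s.1.2 - y|) + 1, -1)]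
      else acc)
    (g := fun acc (s : (Int × Int) × (Int × Int)) =>
      if s.2.2 == y then PySem.Set.add acc s.2.1 else acc)]
  unfold pvBeacons
  rw [PySem.Set.ofList_eq_foldl]
  suffices h : ∀ (l : List ((Int × Int) × (Int × Int))) (acc : PySem.Set Int),
      l.foldl (fun acc s => if s.2.2 == y then PySem.Set.add acc s.2.1 else acc) acc
        = ((l.filter (fun s => s.2.2 == y)).map (fun s => s.2.1)).foldl PySem.Set.add acc by
    exact h sensors PySem.Set.empty
  intro l
  induction l with
  | nil => simp
  | cons s t ih =>
    intro acc
    simp only [List.foldl_cons]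
    by_cases hc : s.2.2 == y
    · rw [if_pos hc, ih]
      simp [hc]
    · rw [if_neg hc, ih]
      simp only [List.filter_cons]
      rw [if_neg hc]

-- sorted events decode exactly the covered union
lemma pvG_eq_IccU (R : List (Int × Int)) (e : Int × Int) (rest : List (Int × Int))
    (hv : ∀ p ∈ R, p.1 ≤ p.2)
    (hperm : (e :: rest).Perm (pvEv R))
    (hpw : ((e :: rest)).Pairwise (fun a b => a.1 ≤ b.1)) :
    pvG e.2 e.1 rest = pvIccU R := by
  rcases List.pairwise_cons.mp hpw with ⟨hmin, hpw'⟩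
  ext z
  rw [mem_pvG rest e.2 e.1 z hmin hpw', mem_pvIccU]
  have hcnt_of : e.1 ≤ z → e.2 + pvCntE rest z
      = (R.countP (fun p => decide (p.1 ≤ z) && decide (z ≤ p.2)) : Int) := by
    intro hez
    have h1 : pvCntE (e :: rest) z = e.2 + pvCntE rest z := by
      simp [pvCntE, if_pos hez]
    rw [← h1, pvCntE_perm z hperm, pvCntE_pvEv R z hv]
  constructor
  · rintro ⟨hez, _, hc⟩
    rw [hcnt_of hez] at hc
    have := List.countP_pos_iff.mp (by exact_mod_cast hc)
    obtain ⟨p, hp, hpred⟩ := this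
    simp only [Bool.and_eq_true, decide_eq_true_eq] at hpred
    exact ⟨p, hp, hpred⟩
  · rintro ⟨p, hp, h1, h2⟩
    have hopen : (p.1, (1 : Int)) ∈ e :: rest := by
      rw [hperm.mem_iff]
      unfold pvEv
      rw [List.mem_flatMap]
      exact ⟨p, hp, by simp⟩
    have hclose : (p.2 + 1, (-1 : Int)) ∈ e :: rest := by
      rw [hperm.mem_iff]
      unfold pvEv
      rw [List.mem_flatMap]
      exact ⟨p, hp, by simp⟩
    have hez : e.1 ≤ z := by
      rcases List.mem_cons.mp hopen with heq | hmem
      · have : e.1 = p.1 := by rw [← heq]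
        omega
      · have := hmin _ hmem; simp at this; omega
    have hclose' : (p.2 + 1, (-1 : Int)) ∈ rest := by
      rcases List.mem_cons.mp hclose with heq | hmem
      · exfalso
        have he1 : e.1 = p.2 + 1 := by rw [← heq]
        have hopen' : (p.1, (1 : Int)) ∈ rest := by
          rcases List.mem_cons.mp hopen with heq2 | hmem2
          · exfalso
            have : (1 : Int) = -1 := by
              have := heq2.trans heq.symm
              exact congrArg Prod.snd this
            omega
          · exact hmem2
        have := hmin _ hopen'
        simp at this
        omega
      · exact hmem
    have hcp : 0 < (R.countP (fun p => decide (p.1 ≤ z) && decide (z ≤ p.2)) : Int) := by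
      have : 0 < R.countP (fun p => decide (p.1 ≤ z) && decide (z ≤ p.2)) :=
        List.countP_pos_iff.mpr ⟨p, hp, by simp only [Bool.and_eq_true, decide_eq_true_eq]; exact ⟨h1, h2⟩⟩
      exact_mod_cast this
    exact ⟨hez, ⟨(p.2 + 1, -1), hclose', by simp; omega⟩, by rw [hcnt_of hez]; omega⟩

-- ===== VERDICT (by name: the statement is the Claim_ definition above) =====
-- pvEv is [] only for an empty range list
lemma pvEv_eq_nil {R : List (Int × Int)} (h : pvEv R = []) : R = [] := by
  cases R with
  | nil => rfl
  | cons p t => simp [pvEv] at h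

theorem count_known_empty_spec : Claim_equal_count_known_empty := by
  intro sensors y _ hpre
  unfold Spec_count_known_empty count_known_empty count_known_empty_alt
  simp only []
  rw [pvBuild_fst, pvBuild_snd]
  have hvalid := pvRangesA_valid sensors y
  have hne := pvRangesA_ne_nil sensors y hpre
  -- A's side
  cases hs : PySem.List.sorted2 (pvRangesA sensors y) (fun p => p.1) (fun p => p.2) with
  | nil =>
    exfalso
    have hperm := PySem.List.sorted2_perm (pvRangesA sensors y) (fun p => p.1) (fun p => p.2) false
    rw [hs] at hperm
    exact hne (List.Perm.nil_eq hperm).symm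
  | cons r0 rest =>
    obtain ⟨l0, r0v⟩ := r0
    have hperm : ((l0, r0v) :: rest).Perm (pvRangesA sensors y) := by
      have := PySem.List.sorted2_perm (pvRangesA sensors y) (fun p => p.1) (fun p => p.2) false
      rw [hs] at this
      exact this
    have hpwS : (((l0, r0v) :: rest)).Pairwise (fun a b => a.1 ≤ b.1) := by
      have := pvSorted2_pairwise (pvRangesA sensors y)
      rw [hs] at this
      exact this
    rcases List.pairwise_cons.mp hpwS with ⟨hminS, hpwS'⟩
    have hvS : ∀ p ∈ (l0, r0v) :: rest, p.1 ≤ p.2 := fun p hp =>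
      hvalid p (hperm.mem_iff.mp hp)
    obtain ⟨cl', cr', done', heq, hpw', hval', hU⟩ :=
      pvMerge_inv rest l0 r0v [] []
        (by simp) (fun p hp => hvS p (by simp at hp; simp [hp]))
        (fun p hp => hminS p hp) hpwS' (fun p hp => hvS p (by simp [hp]))
    have hUR : pvIccU ((cl', cr') :: done') = pvIccU (pvRangesA sensors y) := by
      rw [hU]
      have hsing : pvIccU [(l0, r0v)] ∪ pvIccU rest = pvIccU ((l0, r0v) :: rest) := by
        simp [pvIccU_cons, pvIccU_nil]
      rw [hsing]
      exact pvIccU_perm hperm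
    dsimp only
    rw [heq, pvFoldA_eq_sumF, pvSumF_reverse]
    rw [pvSumF_of_gap (pvBeacons sensors y) ((cl', cr') :: done') hpw' hval', hUR]
    have hcntall : (pvBeacons sensors y).countP
        (fun b => decide (b ∈ pvIccU (pvRangesA sensors y))) = (pvBeacons sensors y).length := by
      apply List.countP_eq_length.mpr
      intro b hb
      simpa using pvBeacons_covered sensors y b hb
    rw [hcntall]
    -- B's side
    cases he : PySem.List.sorted2 (pvEv (pvRangesA sensors y)) (fun e => e.1) (fun e => e.2) with
    | nil =>
      exfalso
      have hperm2 := PySem.List.sorted2_perm (pvEv (pvRangesA sensors y))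
        (fun e => e.1) (fun e => e.2) false
      rw [he] at hperm2
      exact hne (pvEv_eq_nil (List.Perm.nil_eq hperm2).symm)
    | cons e erest =>
      have hperm2 : (e :: erest).Perm (pvEv (pvRangesA sensors y)) := by
        have := PySem.List.sorted2_perm (pvEv (pvRangesA sensors y))
          (fun e => e.1) (fun e => e.2) false
        rw [he] at this
        exact this
      have hpwE : ((e :: erest)).Pairwise (fun a b => a.1 ≤ b.1) := by
        have := pvSorted2_pairwise (pvEv (pvRangesA sensors y))
        rw [he] at this
        exact this
      rcases List.pairwise_cons.mp hpwE with ⟨hminE, hpwE'⟩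
      have hfirst : pvSweepEvStep (0, 0, 0) e = (0, e.2, e.1) := by
        simp [pvSweepEvStep]
      rw [List.foldl_cons, hfirst,
        pvSweep_covered erest 0 e.2 e.1 hpwE' (fun _ q hq => hminE q hq)]
      rw [pvG_eq_IccU (pvRangesA sensors y) e erest hvalid hperm2 hpwE]
      omega
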